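-- pv_equiv track=rewrite | github.com/eliottcassidy2000/math | 04-computation/transfer_matrix_F_connection.py | compute_det_poly
-- ===== SOURCE A (Python) =====
-- from itertools import permutations
--
-- def compute_det_poly(adj, n):
--     """det(W(x)) where W[u][v] = x*adj[u][v] + (1-adj[u][v])*(1-delta_{u,v})."""
--     # Sum over permutations with sign
--     det = [0]*(n+1)
--     for P in permutations(range(n)):
--         # Sign of permutation
--         sign = 1
--         inv = sum(1 for i in range(n) for j in range(i+1, n) if P[i] > P[j])
--         sign = (-1)**inv
--
--         # Product of W[i][P[i]]
--         fwd = 0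
--         valid = True
--         for i in range(n):
--             if i == P[i]:
--                 valid = False  # W[i][i] = 0
--                 break
--             if adj[i][P[i]]:
--                 fwd += 1
--         if not valid:
--             continue
--         det[fwd] += sign
--
--     return det
-- ===== SOURCE B (Python) =====
-- def compute_det_poly(adj, n):
--     """det(W(x)) where W[u][v] = x*adj[u][v] + (1-adj[u][v])*(1-delta_{u,v})."""
--     # DFS over fixed-point-free prefixes, carrying the sign incrementally:
--     # choosing the k-th smallest remaining value contributes k inversions,
--     # so the sign flips iff k is odd; fixed-point branches are pruned early.
--     det = [0] * (n + 1)
--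
--     def go(i, rem, sign, fwd):
--         if not rem:
--             det[fwd] += sign
--             return
--         for k, v in enumerate(rem):
--             if v != i:
--                 go(i + 1, rem[:k] + rem[k + 1:],
--                    sign if k % 2 == 0 else -sign,
--                    fwd + (1 if adj[i][v] else 0))
--
--     go(0, list(range(n)), 1, 0)
--     return det
-- ===== Notes on version B (the rewrite author's own statement) =====
-- stated objective: alternative
-- what changed: B replaces A's enumeration of all n! complete permutations (each re-scored from scratch with an inversion count and a validity scan) by a recursive DFS over fixed-point-free prefixes that prunes fixed points early and carries the permutation sign and edge count incrementally (choosing the k-th smallest remaining value flips the sign iff k is odd).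
import Mathlib
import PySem

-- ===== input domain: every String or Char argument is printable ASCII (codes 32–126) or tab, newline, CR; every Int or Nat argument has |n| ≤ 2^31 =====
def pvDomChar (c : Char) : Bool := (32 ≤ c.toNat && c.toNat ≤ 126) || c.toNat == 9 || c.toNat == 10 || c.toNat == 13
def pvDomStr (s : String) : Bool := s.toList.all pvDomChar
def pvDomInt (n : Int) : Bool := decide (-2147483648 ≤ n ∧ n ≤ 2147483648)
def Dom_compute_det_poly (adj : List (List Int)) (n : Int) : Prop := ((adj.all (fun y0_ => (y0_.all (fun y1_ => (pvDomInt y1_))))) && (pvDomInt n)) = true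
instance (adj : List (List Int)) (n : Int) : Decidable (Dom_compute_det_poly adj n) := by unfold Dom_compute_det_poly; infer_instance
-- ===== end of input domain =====

-- B replaces A's enumeration of whole permutations (each re-scored from scratch
-- by an inversion count and a validity scan) by a DFS over fixed-point-free
-- prefixes carrying the sign and the edge count incrementally; equal return
-- value on Pre_ (no argument is mutated).

-- ===== PORT A =====

-- adj[i][v] truthiness test shared by both ports (both Pythons evaluate `adj[i][v]`);
-- inside Pre_ every performed access is in range, so the getD defaults never fire.
def pvEdge (adj : List (List Int)) (i v : Int) : Int :=
  if (PySem.List.pyGet? ((PySem.List.pyGet? adj i).getD []) v).getD 0 ≠ 0 then 1 else 0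

-- det[k] += s  (inside Pre_ the index k is always 0 ≤ k < len(det))
def pvAddAt (det : List Int) (k : Int) (s : Int) : List Int :=
  det.set k.toNat (det.getD k.toNat 0 + s)

-- itertools.permutations of a duplicate-free list, in its order: for each element
-- in order, that element followed by the permutations of the rest (fuel = length).
def pvPermsA : Nat → List Int → List (List Int)
  | 0, _ => [[]]
  | m + 1, xs => xs.flatMap (fun x => (pvPermsA m (xs.erase x)).map (x :: ·))

-- inv = sum(1 for i for j>i if P[i] > P[j]): head against the rest, then recurse.
def pvInvA : List Int → Nat
  | [] => 0
  | x :: r => r.countP (fun y => decide (y < x)) + pvInvA r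

-- A's valid/fwd loop: walk P with position counter i, none = break on a fixed point.
def pvFwdA (adj : List (List Int)) : Int → List Int → Int → Option Int
  | _, [], fwd => some fwd
  | i, v :: rest, fwd =>
    if i = v then none
    else pvFwdA adj (i + 1) rest (fwd + pvEdge adj i v)

def compute_det_poly (adj : List (List Int)) (n : Int) : List Int :=
  (pvPermsA (PySem.List.pyRange 0 n 1).length (PySem.List.pyRange 0 n 1)).foldl
    (fun det P =>
      let sign : Int := (-1) ^ pvInvA P
      match pvFwdA adj 0 P 0 with
      | none => det
      | some fwd => pvAddAt det fwd sign)
    (List.replicate (n + 1).toNat 0)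

-- ===== PORT B =====

-- go(i, rem, sign, fwd): over enumerate(rem), skip v == i, recurse on
-- rem[:k] + rem[k+1:] with sign flipped iff k is odd (fuel = len(rem)).
def pvGoB (adj : List (List Int)) : Nat → Int → List Int → Int → Int → List Int → List Int
  | 0, _, _, sign, fwd, det => pvAddAt det fwd sign
  | m + 1, i, rem, sign, fwd, det =>
    (PySem.List.enumerate rem 0).foldl
      (fun det kv =>
        if kv.2 ≠ i then
          pvGoB adj m (i + 1)
            (PySem.List.slice rem none (some kv.1) ++ PySem.List.slice rem (some (kv.1 + 1)) none)
            (if kv.1 % 2 = 0 then sign else -sign)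
            (fwd + pvEdge adj i kv.2) det
        else det)
      det

def compute_det_poly_alt (adj : List (List Int)) (n : Int) : List Int :=
  pvGoB adj n.toNat 0 (PySem.List.pyRange 0 n 1) 1 0 (List.replicate (n + 1).toNat 0)

-- ===== PRECONDITION & SPEC =====
-- Pre_ excludes exactly the inputs on which the Python A raises IndexError: n < 0
-- (det[0] += 1 on an empty det), and, for n ≥ 2, an adjacency list with fewer than
-- n rows or with row k shorter than n (n-1 for the last row k = n-1), since some
-- permutation's fixed-point-free prefix reaches every off-diagonal entry (i, j),
-- i, j < n.  (min n.toNat adj.length = n.toNat whenever the length conjunct holds.)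
def Pre_compute_det_poly (adj : List (List Int)) (n : Int) : Prop :=
  0 ≤ n ∧ (n ≤ 1 ∨ (n ≤ (adj.length : Int) ∧
    ∀ k ∈ List.range (min n.toNat adj.length),
      (if (k : Int) = n - 1 then n - 1 else n) ≤ (((adj.getD k []).length : Int))))
instance (adj : List (List Int)) (n : Int) : Decidable (Pre_compute_det_poly adj n) := by
  unfold Pre_compute_det_poly; infer_instance

def pvWitness_compute_det_poly : List (List Int) × Int := ([[0, 1], [1, 0]], 2)

def Spec_compute_det_poly (adj : List (List Int)) (n : Int) (out : List Int) : Prop := out = compute_det_poly_alt adj n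
instance (adj : List (List Int)) (n : Int) (out : List Int) : Decidable (Spec_compute_det_poly adj n out) := by unfold Spec_compute_det_poly; infer_instance

-- ===== CLAIM (what is proved, stated in full; the proofs are below) =====
def Claim_equal_compute_det_poly : Prop := ∀ (adj : List (List Int)) (n : Int), Dom_compute_det_poly adj n → Pre_compute_det_poly adj n → Spec_compute_det_poly adj n (compute_det_poly adj n)

-- ===== LEMMAS AND PROOFS =====

theorem pvFoldlFlatMap {α β γ : Type} (l : List α) (f : α → List β) (g : γ → β → γ) (a : γ) :
    (l.flatMap f).foldl g a = l.foldl (fun a x => (f x).foldl g a) a := by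
  induction l generalizing a with
  | nil => rfl
  | cons x t ih => simp [List.flatMap_cons, List.foldl_append, ih]

theorem pvFoldlId {α γ : Type} (l : List α) (a : γ) : l.foldl (fun a _ => a) a = a := by
  induction l generalizing a with
  | nil => rfl
  | cons x t ih => simp [ih a]

theorem pvPermsA_perm : ∀ (m : Nat) (l : List Int), l.length = m → ∀ Q ∈ pvPermsA m l, Q.Perm l := by
  intro m
  induction m with
  | zero =>
    intro l hl Q hQ
    simp [pvPermsA] at hQ
    subst hQ
    simp [List.length_eq_zero_iff.mp hl]
  | succ m ih =>
    intro l hl Q hQ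
    simp only [pvPermsA, List.mem_flatMap, List.mem_map] at hQ
    obtain ⟨x, hx, Q', hQ', rfl⟩ := hQ
    have hlen : (l.erase x).length = m := by
      rw [List.length_erase_of_mem hx, hl]; omega
    have hperm := ih (l.erase x) hlen Q' hQ'
    exact (hperm.cons x).trans (List.perm_cons_erase hx).symm

theorem pvCountLt (pre s : List Int) (x : Int) (h : (pre ++ x :: s).Pairwise (· < ·)) :
    (pre ++ x :: s).countP (fun y => decide (y < x)) = pre.length := by
  rw [List.countP_append]
  have hsplit := List.pairwise_append.mp h
  have h1 : pre.countP (fun y => decide (y < x)) = pre.length := by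
    rw [List.countP_eq_length]
    intro y hy
    simpa using hsplit.2.2 y hy x (List.mem_cons_self)
  have h2 : (x :: s).countP (fun y => decide (y < x)) = 0 := by
    rw [List.countP_eq_zero]
    intro y hy
    rcases List.mem_cons.mp hy with rfl | hy'
    · simp
    · have := (List.pairwise_cons.mp hsplit.2.1).1 y hy'
      simp; omega
  omega

theorem pvSignPow (sign : Int) (k : Nat) :
    (if ((k : Int) % 2 = 0) then sign else -sign) = sign * (-1) ^ k := by
  rcases Nat.even_or_odd k with he | ho
  · rw [if_pos, he.neg_one_pow, mul_one]
    obtain ⟨c, rfl⟩ := he; push_cast; omega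
  · rw [if_neg, ho.neg_one_pow, mul_neg_one]
    obtain ⟨c, rfl⟩ := ho; push_cast; omega

theorem pvMain (adj : List (List Int)) :
    ∀ (m : Nat) (rem : List Int), rem.length = m → rem.Pairwise (· < ·) →
    ∀ (i sign fwd : Int) (det : List Int),
    (pvPermsA m rem).foldl
      (fun det P => match pvFwdA adj i P fwd with
        | none => det
        | some f => pvAddAt det f (sign * (-1) ^ pvInvA P)) det
    = pvGoB adj m i rem sign fwd det := by
  intro m
  induction m with
  | zero =>
    intro rem hlen _ i sign fwd det
    have hnil : rem = [] := List.length_eq_zero_iff.mp hlen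
    subst hnil
    simp [pvPermsA, pvGoB, pvFwdA, pvInvA]
  | succ m ih =>
    intro rem hlen hpair i sign fwd det
    have hnodup : rem.Nodup := hpair.imp (fun h => ne_of_lt h)
    have inner : ∀ (s pre : List Int) (det : List Int), pre ++ s = rem →
        s.foldl (fun det x => ((pvPermsA m (rem.erase x)).map (x :: ·)).foldl
            (fun det P => match pvFwdA adj i P fwd with
              | none => det
              | some f => pvAddAt det f (sign * (-1) ^ pvInvA P)) det) det
        = (PySem.List.enumerate s (pre.length : Int)).foldl
            (fun det kv =>
              if kv.2 ≠ i then
                pvGoB adj m (i + 1)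
                  (PySem.List.slice rem none (some kv.1) ++
                    PySem.List.slice rem (some (kv.1 + 1)) none)
                  (if kv.1 % 2 = 0 then sign else -sign)
                  (fwd + pvEdge adj i kv.2) det
              else det) det := by
      intro s
      induction s with
      | nil => intro pre det _; simp [PySem.List.enumerate_nil]
      | cons x s' ihs =>
        intro pre det hsplit
        rw [List.foldl_cons, PySem.List.enumerate_cons, List.foldl_cons]
        have hoff : (pre.length : Int) + 1 = (((pre ++ [x]).length : Nat) : Int) := by
          simp
        rw [hoff, ihs (pre ++ [x]) _ (by simpa using hsplit)]
        congr 1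
        -- head element: index k = pre.length, value x = rem[k]
        by_cases hxi : x = i
        · rw [if_neg (by simp [hxi]), List.foldl_map,
            PySem.List.foldl_congr_mem _ _ (fun det _ => det) det
              (by intro acc Q _; simp [pvFwdA, hxi]),
            pvFoldlId]
        · have hx : x ∈ rem := by rw [← hsplit]; simp
          have hxpre : x ∉ pre := by
            have hn := hnodup
            rw [← hsplit] at hn
            exact fun hmem =>
              ((List.nodup_append.mp hn).2.2 x hmem x (List.mem_cons_self)) rfl
          have herase : rem.erase x = pre ++ s' := by
            rw [← hsplit, List.erase_append_right _ hxpre, List.erase_cons_head]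
          have hlenE : (rem.erase x).length = m := by
            rw [List.length_erase_of_mem hx, hlen]; omega
          have hpairE : (rem.erase x).Pairwise (· < ·) :=
            List.Pairwise.sublist List.erase_sublist hpair
          have hp2 : (pre ++ x :: s').Pairwise (· < ·) := by rw [hsplit]; exact hpair
          have hcount : (rem.erase x).countP (fun y => decide (y < x)) = pre.length := by
            have h1 : rem.countP (fun y => decide (y < x)) = pre.length := by
              rw [← hsplit]; exact pvCountLt pre s' x hp2
            have h2 := (List.perm_cons_erase hx).countP_eq (fun y => decide (y < x))
            rw [List.countP_cons] at h2
            simp at h2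
            omega
          have hslice : PySem.List.slice rem none (some ((pre.length : Nat) : Int)) ++
              PySem.List.slice rem (some (((pre.length : Nat) : Int) + 1)) none = rem.erase x := by
            rw [PySem.List.slice_to_natCast,
              show (((pre.length : Nat) : Int) + 1) = (((pre.length + 1 : Nat) : Nat) : Int) by
                push_cast; ring,
              PySem.List.slice_from_natCast, herase, ← hsplit]
            congr 1
            · exact List.take_left
            · have : pre ++ x :: s' = (pre ++ [x]) ++ s' := by simp
              rw [this, show pre.length + 1 = (pre ++ [x]).length by simp, List.drop_left]
          rw [if_pos (by simpa using hxi), List.foldl_map,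
            PySem.List.foldl_congr_mem _ _
              (fun det Q => match pvFwdA adj (i + 1) Q (fwd + pvEdge adj i x) with
                | none => det
                | some f => pvAddAt det f
                    ((if ((pre.length : Int)) % 2 = 0 then sign else -sign) * (-1) ^ pvInvA Q))
              det ?_,
            ih (rem.erase x) hlenE hpairE (i + 1)
              (if ((pre.length : Int)) % 2 = 0 then sign else -sign)
              (fwd + pvEdge adj i x) det, ← hslice]
          · rw [← hoff]
          · intro acc Q hQ
            have hc : Q.countP (fun y => decide (y < x)) = pre.length :=
              ((pvPermsA_perm m (rem.erase x) hlenE Q hQ).countP_eq _).trans hcount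
            have hne : ¬ i = x := fun h => hxi h.symm
            simp only [pvFwdA, pvInvA, if_neg hne]
            rcases h : pvFwdA adj (i + 1) Q (fwd + pvEdge adj i x) with _ | f
            · rfl
            · simp only []
              rw [hc, pvSignPow, pow_add]
              ring_nf
    have htop := inner rem [] det (by simp)
    simp only [List.length_nil, Int.natCast_zero] at htop
    simp only [pvPermsA, pvGoB, pvFoldlFlatMap]
    exact htop

-- ===== VERDICT (by name: the statement is the Claim_ definition above) =====
theorem compute_det_poly_spec : Claim_equal_compute_det_poly := by
  intro adj n _hdom _hpre
  unfold Spec_compute_det_poly compute_det_poly compute_det_poly_alt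
  have hpair : (PySem.List.pyRange 0 n 1).Pairwise (· < ·) :=
    PySem.List.pairwise_lt_pyRange_one 0 n
  have hlen : (PySem.List.pyRange 0 n 1).length = n.toNat := by
    rw [PySem.List.length_pyRange_one]; norm_num
  rw [PySem.List.foldl_congr_mem _ _
        (fun det P => match pvFwdA adj 0 P 0 with
          | none => det
          | some f => pvAddAt det f (1 * (-1) ^ pvInvA P))
        _ (by intro acc P _; rcases h : pvFwdA adj 0 P 0 with _ | f <;> simp [h]),
      pvMain adj (PySem.List.pyRange 0 n 1).length (PySem.List.pyRange 0 n 1) rfl hpair 0 1 0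
        (List.replicate (n + 1).toNat 0), hlen]
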